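-- pv_equiv track=rewrite | github.com/anant9/LeadGeneration | app/utils/helpers.py | normalize_results_consistency
-- ===== SOURCE A (Python) =====
-- from typing import List, Dict, Any
--
-- def normalize_results_consistency(results: List[Dict[str, Any]], limited_fields: List[str] = None) -> List[Dict[str, Any]]:
--     """
--     Normalize results to ensure field consistency across all records.
--
--     For every field that appears in ANY record, ensure it appears in ALL records.
--     If a field is missing in a record, it's added with a null value.
--
--     Args:
--         results: List of result dictionaries
--         limited_fields: Optional list of fields to include. If provided, only these fields are returned,
--                        and only fields with at least one non-null value across all records are kept.
--
--     Returns: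
--         List of normalized results with consistent fields across all records
--     """
--     if not results:
--         return results
--
--     # If limited_fields specified, filter to only those fields first
--     if limited_fields:
--         results = [{k: result.get(k) for k in limited_fields} for result in results]
--
--         # Find which limited fields have at least one non-null value
--         fields_with_data = set()
--         for result in results:
--             for key, value in result.items():
--                 if value is not None:
--                     fields_with_data.add(key)
--
--         # Filter results to only include fields that have data
--         results = [{k: v for k, v in result.items() if k in fields_with_data} for result in results]
--
--     # Collect all unique keys across all results
--     all_keys = set()
--     for result in results:
--         all_keys.update(result.keys())
--
--     # Normalize each result to have all keys
--     normalized_results = []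
--     for result in results:
--         normalized = {}
--         for key in all_keys:
--             normalized[key] = result.get(key, None)
--         normalized_results.append(normalized)
--
--     return normalized_results
-- ===== SOURCE B (Python) =====
-- def normalize_results_consistency(results, limited_fields=None):
--     if not results:
--         return results
--     if limited_fields:
--         keys = [k for k in dict.fromkeys(limited_fields)
--                 if any(r.get(k) is not None for r in results)]
--     else:
--         keys = list(dict.fromkeys(k for r in results for k in r))
--     return [{k: r.get(k) for k in keys} for r in results]
-- ===== Notes on version B (the rewrite author's own statement) =====
-- stated objective: simpler
-- what changed: B computes the final key list once up front (deduped limited_fields filtered by any-non-null, or the union of all record keys) and shapes every record in a single comprehension, replacing A's project/scan-for-data/re-filter/collect-keys pipeline over intermediate dicts.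
import Mathlib
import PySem

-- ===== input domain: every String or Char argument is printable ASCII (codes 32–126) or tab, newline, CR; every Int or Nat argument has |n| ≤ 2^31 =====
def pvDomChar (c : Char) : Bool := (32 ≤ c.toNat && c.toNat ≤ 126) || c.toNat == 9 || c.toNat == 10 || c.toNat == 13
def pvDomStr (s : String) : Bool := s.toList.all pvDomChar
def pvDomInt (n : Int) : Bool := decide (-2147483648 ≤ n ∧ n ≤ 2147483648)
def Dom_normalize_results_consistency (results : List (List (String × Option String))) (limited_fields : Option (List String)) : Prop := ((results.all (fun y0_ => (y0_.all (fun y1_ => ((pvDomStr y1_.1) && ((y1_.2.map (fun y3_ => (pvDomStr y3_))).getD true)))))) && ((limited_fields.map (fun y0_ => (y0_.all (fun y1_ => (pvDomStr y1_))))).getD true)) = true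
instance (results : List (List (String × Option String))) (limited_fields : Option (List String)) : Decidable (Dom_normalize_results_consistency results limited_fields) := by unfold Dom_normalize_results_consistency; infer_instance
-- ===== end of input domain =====

-- B computes the final key list once up front, then shapes every record in one pass;
-- A builds intermediate filtered dicts and rescans them.  Objective: simpler.
-- (Python A iterates a hash set to build the output dicts; dicts compare ignoring order,
-- the ports realise the set in insertion order.)

-- shared primitive: Python r.get(k) (default None) on a dict given as its items list
def pvGet (r : List (String × Option String)) (k : String) : Option String :=
  (List.lookup k r).getD none

-- ===== PORT A =====
-- A-side helpers: dict comprehension {k: v k for k in ks}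
def pvDictOf (v : String → Option String) (ks : List String) : PySem.Dict String (Option String) :=
  ks.foldl (fun d k => d.insert k (v k)) PySem.Dict.empty

-- all_keys loop: set(); for result in rs: all_keys.update(result.keys())
def pvCollectKeys (rs : List (List (String × Option String))) : PySem.Set String :=
  rs.foldl (fun s r => PySem.Set.update s (r.map (·.1))) PySem.Set.empty

-- final normalization loop of A
def pvNormalize (rs : List (List (String × Option String))) : List (List (String × Option String)) :=
  let allKeys := pvCollectKeys rs
  rs.map (fun r => (pvDictOf (fun k => pvGet r k) allKeys).items)

def normalize_results_consistency (results : List (List (String × Option String))) (limited_fields : Option (List String)) : List (List (String × Option String)) :=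
  if results = [] then results else
  match limited_fields with
  | some lf =>
      if lf = [] then pvNormalize results
      else
        let projected := results.map (fun r => (pvDictOf (fun k => pvGet r k) lf).items)
        let fwd := projected.foldl
          (fun s r => r.foldl (fun s kv => if kv.2.isSome then PySem.Set.add s kv.1 else s) s)
          PySem.Set.empty
        let filtered := projected.map (fun r =>
          (r.foldl (fun d kv => if PySem.Set.contains fwd kv.1 then d.insert kv.1 kv.2 else d)
            PySem.Dict.empty).items)
        pvNormalize filtered
  | none => pvNormalize results

-- ===== PORT B =====
-- B-side helper: the final key list
def pvKeysB (results : List (List (String × Option String))) (limited_fields : Option (List String)) : List String :=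
  match limited_fields with
  | some lf =>
      if lf = [] then PySem.List.dedup (results.flatMap (fun r => r.map (·.1)))
      else (PySem.List.dedup lf).filter (fun k => results.any (fun r => (pvGet r k).isSome))
  | none => PySem.List.dedup (results.flatMap (fun r => r.map (·.1)))

def normalize_results_consistency_alt (results : List (List (String × Option String))) (limited_fields : Option (List String)) : List (List (String × Option String)) :=
  if results = [] then results else
  let keys := pvKeysB results limited_fields
  results.map (fun r => keys.map (fun k => (k, pvGet r k)))

-- ===== PRECONDITION & SPEC =====
def Spec_normalize_results_consistency (results : List (List (String × Option String))) (limited_fields : Option (List String)) (out : List (List (String × Option String))) : Prop := out = normalize_results_consistency_alt results limited_fields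
instance (results : List (List (String × Option String))) (limited_fields : Option (List String)) (out : List (List (String × Option String))) : Decidable (Spec_normalize_results_consistency results limited_fields out) := by unfold Spec_normalize_results_consistency; infer_instance

-- ===== CLAIM (what is proved, stated in full; the proofs are below) =====
def Claim_equal_normalize_results_consistency : Prop := ∀ (results : List (List (String × Option String))) (limited_fields : Option (List String)), Dom_normalize_results_consistency results limited_fields → Spec_normalize_results_consistency results limited_fields (normalize_results_consistency results limited_fields)

-- ===== LEMMAS AND PROOFS =====

lemma pvDictOf_getD (v : String → Option String) (ks : List String)
    (d : PySem.Dict String (Option String)) (k0 : String) :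
    (ks.foldl (fun d k => d.insert k (v k)) d).getD k0 none
      = if k0 ∈ ks then v k0 else d.getD k0 none := by
  induction ks generalizing d with
  | nil => simp
  | cons a t ih =>
      simp only [List.foldl_cons, ih, List.mem_cons, PySem.Dict.getD_insert]
      by_cases h1 : k0 ∈ t <;> by_cases h2 : k0 = a <;> simp [h1, h2]

lemma pvDictOf_items (v : String → Option String) (ks : List String) :
    (pvDictOf v ks).items = (PySem.List.dedup ks).map (fun k => (k, v k)) := by
  have hnd : (pvDictOf v ks).keys.Nodup :=
    PySem.Dict.nodup_keys_foldl_insert ks (fun _ k => v k) PySem.Dict.empty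
      (by simp)
  have hkeys : (pvDictOf v ks).keys = PySem.Set.ofList ks := by
    simp [pvDictOf, PySem.Dict.keys_foldl_insert, PySem.Dict.keys_empty,
      PySem.Set.update_nil_left]
  rw [PySem.Dict.items_eq_map_keys _ hnd none, hkeys, PySem.List.dedup_eq_ofList]
  refine List.map_congr_left (fun k hk => ?_)
  have hmem : k ∈ ks := (PySem.Set.mem_ofList _ _).mp hk
  simp [pvDictOf, pvDictOf_getD, hmem]

lemma foldl_update_eq {α β : Type} [BEq α] (f : β → List α) (rs : List β)
    (s : PySem.Set α) :
    rs.foldl (fun s r => PySem.Set.update s (f r)) s = PySem.Set.update s (rs.flatMap f) := by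
  induction rs generalizing s with
  | nil => simp [PySem.Set.update_nil]
  | cons a t ih => simp [List.foldl_cons, ih, PySem.Set.update_append]

lemma pvCollect_eq (rs : List (List (String × Option String))) :
    pvCollectKeys rs = PySem.List.dedup (rs.flatMap (fun r => r.map (·.1))) := by
  simp [pvCollectKeys, foldl_update_eq, PySem.Set.update_nil_left, PySem.List.dedup_eq_ofList]

lemma pvGet_map (v : String → Option String) (ks : List String) (k : String) (hk : k ∈ ks) :
    pvGet (ks.map (fun k' => (k', v k'))) k = v k := by
  induction ks with
  | nil => cases hk
  | cons a t ih =>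
      by_cases h : a = k
      · simp [pvGet, h]
      · rcases List.mem_cons.mp hk with h' | h'
        · exact absurd h'.symm h
        · have hb : (k == a) = false := by simp [beq_eq_false_iff_ne]; exact fun e => h e.symm
          simpa [pvGet, List.lookup, hb] using ih h'

lemma mem_foldl_addIf (kvs : List (String × Option String)) (s : PySem.Set String) (k : String) :
    k ∈ kvs.foldl (fun s kv => if kv.2.isSome then PySem.Set.add s kv.1 else s) s
      ↔ k ∈ s ∨ ∃ kv ∈ kvs, kv.1 = k ∧ kv.2.isSome := by
  induction kvs generalizing s with
  | nil => simp
  | cons a t ih =>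
      simp only [List.foldl_cons]
      by_cases h : a.2.isSome
      · simp [h, ih, PySem.Set.mem_add]; tauto
      · simp [h, ih]

lemma mem_fwd (rs : List (List (String × Option String))) (s : PySem.Set String) (k : String) :
    k ∈ rs.foldl (fun s r => r.foldl (fun s kv => if kv.2.isSome then PySem.Set.add s kv.1 else s) s) s
      ↔ k ∈ s ∨ ∃ r ∈ rs, ∃ kv ∈ r, kv.1 = k ∧ kv.2.isSome := by
  induction rs generalizing s with
  | nil => simp
  | cons a t ih =>
      simp [List.foldl_cons, ih, mem_foldl_addIf]
      exact or_assoc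

lemma pvNormalize_eq (rs : List (List (String × Option String))) :
    pvNormalize rs = rs.map (fun r => (pvCollectKeys rs).map (fun k => (k, pvGet r k))) := by
  unfold pvNormalize
  refine List.map_congr_left (fun r hr => ?_)
  rw [pvDictOf_items]
  congr 1
  rw [pvCollect_eq]
  simp [PySem.List.dedup_eq_ofList, PySem.Set.ofList_ofList]

lemma nolimit_case (results : List (List (String × Option String))) :
    pvNormalize results
      = results.map (fun r =>
          (PySem.List.dedup (results.flatMap (fun r => r.map (·.1)))).map (fun k => (k, pvGet r k))) := by
  rw [pvNormalize_eq, pvCollect_eq]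

lemma dedup_flatMap_const {β : Type} (rs : List β) (F : List String)
    (hrs : rs ≠ []) (hF : F.Nodup) :
    PySem.List.dedup (rs.flatMap (fun _ => F)) = F := by
  cases rs with
  | nil => exact absurd rfl hrs
  | cons a t =>
      rw [List.flatMap_cons, PySem.List.dedup_eq_ofList, PySem.Set.ofList_append,
        PySem.Set.ofList_eq_self_of_nodup _ hF, PySem.Set.update_eq_append_filter]
      simp

lemma limited_main (results : List (List (String × Option String))) (K : List String)
    (c : String → Bool) (hres : results ≠ []) (hK : K.Nodup) :
    pvNormalize (results.map (fun r =>
      (((K.map (fun k => (k, pvGet r k))).foldl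
        (fun d kv => if c kv.1 then d.insert kv.1 kv.2 else d) PySem.Dict.empty)).items))
      = results.map (fun r => (K.filter c).map (fun k => (k, pvGet r k))) := by
  have hrec : ∀ r : List (String × Option String),
      (((K.map (fun k => (k, pvGet r k))).foldl
        (fun d kv => if c kv.1 then d.insert kv.1 kv.2 else d) PySem.Dict.empty)).items
        = (K.filter c).map (fun k => (k, pvGet r k)) := by
    intro r
    rw [← List.foldl_filter, List.filter_map]
    have h2 : (List.map (fun kv : String × Option String => kv.1)
        (List.map (fun k => (k, pvGet r k))
          (List.filter ((fun kv : String × Option String => c kv.1) ∘ (fun k => (k, pvGet r k))) K))).Nodup := by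
      simp only [List.map_map, Function.comp_def, List.map_id']
      exact hK.filter _
    have h3 := PySem.Dict.items_foldl_insert_fresh
        (List.map (fun k => (k, pvGet r k))
          (List.filter ((fun kv : String × Option String => c kv.1) ∘ (fun k => (k, pvGet r k))) K))
        (fun kv => kv.1) (fun kv => kv.2) PySem.Dict.empty (fun a _ => by simp) h2
    simpa [Function.comp_def, List.map_map] using h3
  simp only [hrec]
  rw [pvNormalize_eq]
  have hcoll : pvCollectKeys (results.map (fun r => (K.filter c).map (fun k => (k, pvGet r k))))
      = K.filter c := by
    rw [pvCollect_eq, List.flatMap_map]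
    have : (fun a : List (String × Option String) =>
        List.map (fun x => x.1) ((K.filter c).map (fun k => (k, pvGet a k))))
        = fun _ => K.filter c := by
      funext a; simp [List.map_map, Function.comp_def]
    simp only [this]
    exact dedup_flatMap_const results (K.filter c) hres (hK.filter _)
  rw [hcoll, List.map_map]
  refine List.map_congr_left (fun r _ => ?_)
  refine List.map_congr_left (fun k hk => ?_)
  rw [pvGet_map (fun k => pvGet r k) _ _ hk]

-- ===== VERDICT (by name: the statement is the Claim_ definition above) =====
theorem normalize_results_consistency_spec : Claim_equal_normalize_results_consistency := by
  intro results lf _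
  unfold Spec_normalize_results_consistency
  unfold normalize_results_consistency normalize_results_consistency_alt
  by_cases hres : results = []
  · simp [hres]
  · simp only [if_neg hres]
    cases lf with
    | none => exact nolimit_case results
    | some l =>
      by_cases hl : l = []
      · simp only [hl, pvKeysB, ↓reduceIte]
        exact nolimit_case results
      · simp only [if_neg hl, pvKeysB]
        have hK : ∀ r : List (String × Option String),
            (pvDictOf (fun k => pvGet r k) l).items
              = (PySem.List.dedup l).map (fun k => (k, pvGet r k)) :=
          fun r => pvDictOf_items _ _
        simp only [hK]
        have hnd : (PySem.List.dedup l).Nodup := by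
          rw [PySem.List.dedup_eq_ofList]; exact PySem.Set.nodup_ofList _
        set fwd := List.foldl (fun s r => List.foldl (fun s kv => if kv.2.isSome = true then s.add kv.1 else s) s r)
            PySem.Set.empty
            (List.map (fun r => List.map (fun k => (k, pvGet r k)) (PySem.List.dedup l)) results)
          with hfwddef
        rw [List.map_map]
        simp only [Function.comp_def]
        rw [limited_main results (PySem.List.dedup l) (fun x => fwd.contains x) hres hnd]
        have hfwd : ∀ k ∈ PySem.List.dedup l,
            fwd.contains k = results.any (fun r => (pvGet r k).isSome) := by
          intro k hkK
          rw [← Bool.coe_iff_coe, PySem.Set.contains_iff, hfwddef, mem_fwd]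
          simp only [PySem.Set.empty]
          constructor
          · rintro (h | ⟨r', hr', kv, hkv, hk1, hk2⟩)
            · simp at h
            · rcases List.mem_map.mp hr' with ⟨r, hr, rfl⟩
              rcases List.mem_map.mp hkv with ⟨k', _, rfl⟩
              refine List.any_eq_true.mpr ⟨r, hr, ?_⟩
              simpa [← hk1] using hk2
          · intro h
            rcases List.any_eq_true.mp h with ⟨r, hr, hsome⟩
            refine Or.inr ⟨_, List.mem_map.mpr ⟨r, hr, rfl⟩,
              (k, pvGet r k), List.mem_map.mpr ⟨k, hkK, rfl⟩, rfl, by simpa using hsome⟩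
        rw [List.filter_congr hfwd]
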